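-- pv_equiv track=rewrite | github.com/jjohnnystwsss/cheat-meal | backend/recommender.py | _combo_reason
-- ===== SOURCE A (Python) =====
-- _FLAVOR_MAP = [
--     (["beef"], "牛肉控必選"),
--     (["spicy"], "嗜辣派首選"),
--     (["boba", "tea"], "台式飲料控"),
--     (["sushi", "sashimi"], "清爽日式風味"),
--     (["fried", "sweet"], "鹹甜兼顧"),
--     (["fried"], "炸物控的最愛"),
--     (["comfort_food"], "療癒系首選"),
--     (["fish"], "海鮮清爽路線"),
-- ]
--
-- def _combo_reason(items, total_cal, target_cal):
--     diff = total_cal - target_cal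
--     if abs(diff) <= 100:
--         range_text = "剛好命中目標熱量"
--     elif diff > 0:
--         range_text = f"比目標多 {diff} kcal，超值爽感"
--     else:
--         range_text = f"比目標少 {abs(diff)} kcal，稍微克制一點"
--
--     tags_all = {t for item in items for t in item.get("tags", [])}
--     flavor = "均衡美味"
--     for tag_list, label in _FLAVOR_MAP:
--         if any(t in tags_all for t in tag_list):
--             flavor = label
--             break
--
--     return f"{flavor}，{range_text}。"
-- ===== SOURCE B (Python) =====
-- _FLAVOR_MAP = [
--     (["beef"], "牛肉控必選"),
--     (["spicy"], "嗜辣派首選"),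
--     (["boba", "tea"], "台式飲料控"),
--     (["sushi", "sashimi"], "清爽日式風味"),
--     (["fried", "sweet"], "鹹甜兼顧"),
--     (["fried"], "炸物控的最愛"),
--     (["comfort_food"], "療癒系首選"),
--     (["fish"], "海鮮清爽路線"),
-- ]
--
-- # Inverted index: each tag -> index of the first (i.e. highest-priority) rule containing it.
-- _TAG_PRIO = {}
-- for _i, (_tags, _label) in enumerate(_FLAVOR_MAP):
--     for _t in _tags:
--         if _t not in _TAG_PRIO:
--             _TAG_PRIO[_t] = _i
--
-- _LABELS = [label for _, label in _FLAVOR_MAP]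
--
--
-- def _combo_reason(items, total_cal, target_cal):
--     diff = total_cal - target_cal
--     if abs(diff) <= 100:
--         range_text = "剛好命中目標熱量"
--     elif diff > 0:
--         range_text = f"比目標多 {diff} kcal，超值爽感"
--     else:
--         range_text = f"比目標少 {abs(diff)} kcal，稍微克制一點"
--
--     # One pass over all tags, keeping the smallest rule index seen.
--     best = None
--     for item in items:
--         for t in item.get("tags", []):
--             i = _TAG_PRIO.get(t)
--             if i is not None and (best is None or i < best):
--                 best = i
--     flavor = "均衡美味" if best is None else _LABELS[best]
--
--     return f"{flavor}，{range_text}。"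
-- ===== Notes on version B (the rewrite author's own statement) =====
-- stated objective: alternative
-- what changed: Replaces A's 'collect a tag set, then scan the rule list in order testing membership' with an inverted index (tag -> smallest rule index, built once at module level) and a single pass over all item tags keeping the minimum rule index; no tag set is built.
import Mathlib
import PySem

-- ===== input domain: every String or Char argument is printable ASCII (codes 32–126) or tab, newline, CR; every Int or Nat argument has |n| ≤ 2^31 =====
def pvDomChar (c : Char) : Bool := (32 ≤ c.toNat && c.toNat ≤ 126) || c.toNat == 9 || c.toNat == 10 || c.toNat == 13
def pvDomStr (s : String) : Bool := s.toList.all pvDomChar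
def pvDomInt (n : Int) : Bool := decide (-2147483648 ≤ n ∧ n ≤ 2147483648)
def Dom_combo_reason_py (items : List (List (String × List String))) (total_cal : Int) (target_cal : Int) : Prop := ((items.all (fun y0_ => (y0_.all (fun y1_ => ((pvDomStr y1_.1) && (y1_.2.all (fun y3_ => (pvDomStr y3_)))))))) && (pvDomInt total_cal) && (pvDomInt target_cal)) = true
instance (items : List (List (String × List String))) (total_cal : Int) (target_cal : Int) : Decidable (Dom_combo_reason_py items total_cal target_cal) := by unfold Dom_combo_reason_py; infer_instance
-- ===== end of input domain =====

-- B replaces A's ordered scan of the rule list against a collected tag set with a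
-- module-level inverted index (tag -> smallest rule index) and a single pass over all
-- item tags keeping the minimum index (objective: alternative decomposition).

-- ===== PORT A =====
def pvFlavorMap : List (List String × String) := [
  (["beef"], "牛肉控必選"),
  (["spicy"], "嗜辣派首選"),
  (["boba", "tea"], "台式飲料控"),
  (["sushi", "sashimi"], "清爽日式風味"),
  (["fried", "sweet"], "鹹甜兼顧"),
  (["fried"], "炸物控的最愛"),
  (["comfort_food"], "療癒系首選"),
  (["fish"], "海鮮清爽路線")]

-- A's 'for (tag_list, label) in _FLAVOR_MAP: … break' loop (default before the loop)
def pvFirstFlavor (tagsAll : PySem.Set String) : List (List String × String) → String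
  | [] => "均衡美味"
  | (tag_list, label) :: rest =>
      if tag_list.any (fun t => PySem.Set.contains tagsAll t) then label
      else pvFirstFlavor tagsAll rest

def combo_reason_py (items : List (List (String × List String))) (total_cal : Int) (target_cal : Int) : String :=
  let diff := total_cal - target_cal
  let range_text :=
    if |diff| ≤ 100 then "剛好命中目標熱量"
    else if diff > 0 then "比目標多 " ++ PySem.Int.toStr diff ++ " kcal，超值爽感"
    else "比目標少 " ++ PySem.Int.toStr |diff| ++ " kcal，稍微克制一點"
  let tagsAll : PySem.Set String :=
    PySem.Set.ofList (items.flatMap (fun item => (PySem.Dict.mk item).getD "tags" []))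
  let flavor := pvFirstFlavor tagsAll pvFlavorMap
  flavor ++ "，" ++ range_text ++ "。"

-- ===== PORT B =====
-- Source B's module-level loop building _TAG_PRIO (tag -> index of first rule containing it)
def pvTagPrio : PySem.Dict String Int :=
  (PySem.List.enumerate pvFlavorMap 0).foldl
    (fun d p => p.2.1.foldl (fun d t => if d.contains t then d else d.insert t p.1) d)
    PySem.Dict.empty

-- Source B's module-level _LABELS
def pvLabels : List String := pvFlavorMap.map (fun p => p.2)

-- body of Source B's inner loop: i = _TAG_PRIO.get(t); keep the smaller index
def pvStep (best : Option Int) (t : String) : Option Int :=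
  match pvTagPrio.get? t with
  | none => best
  | some i =>
    match best with
    | none => some i
    | some j => if i < j then some i else best

def combo_reason_py_alt (items : List (List (String × List String))) (total_cal : Int) (target_cal : Int) : String :=
  let diff := total_cal - target_cal
  let range_text :=
    if |diff| ≤ 100 then "剛好命中目標熱量"
    else if diff > 0 then "比目標多 " ++ PySem.Int.toStr diff ++ " kcal，超值爽感"
    else "比目標少 " ++ PySem.Int.toStr |diff| ++ " kcal，稍微克制一點"
  let best : Option Int :=
    items.foldl (fun b item => ((PySem.Dict.mk item).getD "tags" []).foldl pvStep b) none
  let flavor :=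
    match best with
    | none => "均衡美味"
    | some i => PySem.List.pyGetD pvLabels i ""
  flavor ++ "，" ++ range_text ++ "。"

-- ===== PRECONDITION & SPEC =====
def Spec_combo_reason_py (items : List (List (String × List String))) (total_cal : Int) (target_cal : Int) (out : String) : Prop := out = combo_reason_py_alt items total_cal target_cal
instance (items : List (List (String × List String))) (total_cal : Int) (target_cal : Int) (out : String) : Decidable (Spec_combo_reason_py items total_cal target_cal out) := by unfold Spec_combo_reason_py; infer_instance

-- ===== CLAIM (what is proved, stated in full; the proofs are below) =====
def Claim_equal_combo_reason_py : Prop := ∀ (items : List (List (String × List String))) (total_cal : Int) (target_cal : Int), Dom_combo_reason_py items total_cal target_cal → Spec_combo_reason_py items total_cal target_cal (combo_reason_py items total_cal target_cal)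

-- ===== LEMMAS AND PROOFS =====

-- min on Option Int (left argument preferred on ties)
def pvOptMin (a b : Option Int) : Option Int :=
  match a, b with
  | none, b => b
  | a, none => a
  | some i, some j => if j < i then some j else some i

-- the smallest rule index hit by any tag of L, in closed form
def pvF (L : List String) : Option Int :=
  if "beef" ∈ L then some 0
  else if "spicy" ∈ L then some 1
  else if "boba" ∈ L ∨ "tea" ∈ L then some 2
  else if "sushi" ∈ L ∨ "sashimi" ∈ L then some 3
  else if "fried" ∈ L ∨ "sweet" ∈ L then some 4
  else if "comfort_food" ∈ L then some 6
  else if "fish" ∈ L then some 7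
  else none

lemma pvTagPrio_eq : pvTagPrio = PySem.Dict.mk
    [("beef", 0), ("spicy", 1), ("boba", 2), ("tea", 2), ("sushi", 3), ("sashimi", 3),
     ("fried", 4), ("sweet", 4), ("comfort_food", 6), ("fish", 7)] := by
  rfl

lemma pvStep_eq (b : Option Int) (t : String) : pvStep b t = pvOptMin b (pvTagPrio.get? t) := by
  unfold pvStep pvOptMin
  cases pvTagPrio.get? t <;> cases b <;> simp

lemma pvOptMin_assoc (a b c : Option Int) :
    pvOptMin (pvOptMin a b) c = pvOptMin a (pvOptMin b c) := by
  rcases a with _ | i <;> rcases b with _ | j <;> rcases c with _ | k <;>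
    simp only [pvOptMin] <;> split_ifs <;> simp_all <;>
    (intros; first | omega | (split_ifs <;> simp_all <;> omega))

set_option maxHeartbeats 1000000 in
lemma pvF_cons (t : String) (L : List String) :
    pvOptMin (pvTagPrio.get? t) (pvF L) = pvF (t :: L) := by
  rw [pvTagPrio_eq]
  by_cases h0 : t = "beef"
  · subst h0; simp only [pvF, List.mem_cons, PySem.Dict.get?]; norm_num
    split_ifs <;> simp_all [pvOptMin]
  by_cases h1 : t = "spicy"
  · subst h1; simp only [pvF, List.mem_cons, PySem.Dict.get?]; norm_num
    split_ifs <;> simp_all [pvOptMin]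
  by_cases h2 : t = "boba"
  · subst h2; simp only [pvF, List.mem_cons, PySem.Dict.get?]; norm_num
    split_ifs <;> simp_all [pvOptMin]
  by_cases h3 : t = "tea"
  · subst h3; simp only [pvF, List.mem_cons, PySem.Dict.get?]; norm_num
    split_ifs <;> simp_all [pvOptMin]
  by_cases h4 : t = "sushi"
  · subst h4; simp only [pvF, List.mem_cons, PySem.Dict.get?]; norm_num
    split_ifs <;> simp_all [pvOptMin]
  by_cases h5 : t = "sashimi"
  · subst h5; simp only [pvF, List.mem_cons, PySem.Dict.get?]; norm_num
    split_ifs <;> simp_all [pvOptMin]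
  by_cases h6 : t = "fried"
  · subst h6; simp only [pvF, List.mem_cons, PySem.Dict.get?]; norm_num
    split_ifs <;> simp_all [pvOptMin]
  by_cases h7 : t = "sweet"
  · subst h7; simp only [pvF, List.mem_cons, PySem.Dict.get?]; norm_num
    split_ifs <;> simp_all [pvOptMin]
  by_cases h8 : t = "comfort_food"
  · subst h8; simp only [pvF, List.mem_cons, PySem.Dict.get?]; norm_num
    split_ifs <;> simp_all [pvOptMin]
  by_cases h9 : t = "fish"
  · subst h9; simp only [pvF, List.mem_cons, PySem.Dict.get?]; norm_num
    split_ifs <;> simp_all [pvOptMin]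
  · have hg : (PySem.Dict.mk
        [("beef", (0:Int)), ("spicy", 1), ("boba", 2), ("tea", 2), ("sushi", 3), ("sashimi", 3),
         ("fried", 4), ("sweet", 4), ("comfort_food", 6), ("fish", 7)]).get? t = none := by
      simp [PySem.Dict.get?, Ne.symm h0, Ne.symm h1, Ne.symm h2, Ne.symm h3, Ne.symm h4,
        Ne.symm h5, Ne.symm h6, Ne.symm h7, Ne.symm h8, Ne.symm h9]
    rw [hg]
    simp only [pvF, List.mem_cons, Ne.symm h0, Ne.symm h1, Ne.symm h2, Ne.symm h3, Ne.symm h4,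
      Ne.symm h5, Ne.symm h6, Ne.symm h7, Ne.symm h8, Ne.symm h9, false_or, pvOptMin]

lemma pvFoldl_step (L : List String) : ∀ b, L.foldl pvStep b = pvOptMin b (pvF L) := by
  induction L with
  | nil => intro b; cases b <;> simp [pvF, pvOptMin]
  | cons t L ih =>
      intro b
      rw [List.foldl_cons, ih, pvStep_eq, pvOptMin_assoc, pvF_cons]

lemma pvFoldl_flat (g : List (String × List String) → List String)
    (items : List (List (String × List String))) : ∀ b : Option Int,
    items.foldl (fun b item => (g item).foldl pvStep b) b = (items.flatMap g).foldl pvStep b := by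
  induction items with
  | nil => intro b; simp
  | cons it rest ih => intro b; simp [List.foldl_append, ih]

lemma pvBest_eq (items : List (List (String × List String))) :
    items.foldl (fun b item => ((PySem.Dict.mk item).getD "tags" []).foldl pvStep b) none =
      pvF (items.flatMap (fun item => (PySem.Dict.mk item).getD "tags" [])) := by
  rw [pvFoldl_flat (fun item => (PySem.Dict.mk item).getD "tags" []), pvFoldl_step]
  rfl

lemma pvFirstFlavor_eq (L : List String) :
    pvFirstFlavor (PySem.Set.ofList L) pvFlavorMap =
      (match pvF L with
       | none => "均衡美味"
       | some i => PySem.List.pyGetD pvLabels i "") := by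
  have hc : ∀ t : String, (PySem.Set.contains (PySem.Set.ofList L) t) = decide (t ∈ L) := by
    intro t
    by_cases h : t ∈ L <;> simp [PySem.Set.mem_ofList, h]
  simp only [pvFirstFlavor, pvFlavorMap, List.any_cons, List.any_nil, hc, pvF,
    Bool.or_false, decide_eq_true_eq]
  split_ifs <;> first | rfl | tauto | simp_all

-- ===== VERDICT (by name: the statement is the Claim_ definition above) =====
theorem combo_reason_py_spec : Claim_equal_combo_reason_py := by
  intro items total_cal target_cal _
  unfold Spec_combo_reason_py
  simp only [combo_reason_py, combo_reason_py_alt, pvBest_eq, pvFirstFlavor_eq]
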